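-- pv_equiv track=rewrite | github.com/KoxAlen/adventofcode | day19/script.py | askalski_solution
-- ===== SOURCE A (Python) =====
-- def askalski_solution(string):
--     """
--     Solution based on the properties of the grammar
--     https://www.reddit.com/r/adventofcode/comments/3xflz8/day_19_solutions/cy4etju
--     Even though my solution works (at least for my input) I found this interesting"""
--     t = 0
--     i = 0
--     while i < len(string):
--         try:
--             if string[i+1].islower():
--                 i += 1
--         except IndexError:
--             pass
--         i += 1
--         t += 1
--     par = string.count("Rn") + string.count("Ar")
--     sep = string.count("Y")
--     return t - par - sep*2 -1
-- ===== SOURCE B (Python) =====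
-- def askalski_solution(string):
--     tokens = []
--     for c in string:
--         if c.islower() and tokens and len(tokens[-1]) == 1:
--             tokens[-1] += c
--         else:
--             tokens.append(c)
--     return len(tokens) - string.count("Rn") - string.count("Ar") - 2 * string.count("Y") - 1
-- ===== Notes on version B (the rewrite author's own statement) =====
-- stated objective: idiomatic
-- what changed: Replaces the index-stepping while-loop with try/except lookahead by a single for-loop that builds the token list directly (a lowercase letter joins the previous token when that token is still a single character), then takes its length.
import Mathlib
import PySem

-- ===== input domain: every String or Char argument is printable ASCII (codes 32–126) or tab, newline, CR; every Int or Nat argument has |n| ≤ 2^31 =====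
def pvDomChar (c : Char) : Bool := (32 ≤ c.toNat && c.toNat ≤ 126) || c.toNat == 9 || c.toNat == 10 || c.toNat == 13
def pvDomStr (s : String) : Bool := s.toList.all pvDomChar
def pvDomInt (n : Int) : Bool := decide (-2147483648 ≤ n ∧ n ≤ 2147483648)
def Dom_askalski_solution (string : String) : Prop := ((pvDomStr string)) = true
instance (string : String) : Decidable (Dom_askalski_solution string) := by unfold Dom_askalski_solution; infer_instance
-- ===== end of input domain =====

-- ===== PORT A =====
-- B changes only the token-counting loop (for-loop building a token list instead of index
-- stepping with try/except); the three substring counts and the final arithmetic are unchanged.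
def aLoop (cs : List Char) (i : Nat) (t : Int) : Int :=
  if _h : i < cs.length then
    match PySem.List.pyGet? cs ((i : Int) + 1) with
    | some c => if PySem.Chars.islower c then aLoop cs (i + 2) (t + 1) else aLoop cs (i + 1) (t + 1)
    | none => aLoop cs (i + 1) (t + 1)
  else t
termination_by cs.length - i
decreasing_by all_goals omega

def askalski_solution (string : String) : Int :=
  let t := aLoop string.toList 0 0
  let par : Int := (PySem.Str.count string "Rn" : Int) + (PySem.Str.count string "Ar" : Int)
  let sep : Int := (PySem.Str.count string "Y" : Int)
  t - par - sep * 2 - 1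

-- ===== PORT B =====
def altStep (toks : List (List Char)) (c : Char) : List (List Char) :=
  match toks with
  | h :: tl => if PySem.Chars.islower c && h.length == 1 then (h ++ [c]) :: tl else [c] :: toks
  | [] => [c] :: toks

def askalski_solution_alt (string : String) : Int :=
  let tokens := string.toList.foldl altStep []
  (tokens.length : Int) - (PySem.Str.count string "Rn" : Int) - (PySem.Str.count string "Ar" : Int)
    - 2 * (PySem.Str.count string "Y" : Int) - 1

-- ===== PRECONDITION & SPEC =====
def Spec_askalski_solution (string : String) (out : Int) : Prop := out = askalski_solution_alt string
instance (string : String) (out : Int) : Decidable (Spec_askalski_solution string out) := by unfold Spec_askalski_solution; infer_instance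

-- ===== CLAIM (what is proved, stated in full; the proofs are below) =====
def Claim_equal_askalski_solution : Prop := ∀ (string : String), Dom_askalski_solution string → Spec_askalski_solution string (askalski_solution string)

-- ===== LEMMAS AND PROOFS =====
-- greedy token count with a flag saying whether the current token is still "open" (length 1)
def fTok : Bool → List Char → Int
  | _, [] => 0
  | true, c :: r => if PySem.Chars.islower c then fTok false r else 1 + fTok true r
  | false, _ :: r => 1 + fTok true r

def isOpen : List (List Char) → Bool
  | h :: _ => h.length == 1
  | [] => false

theorem aLoop_eq (cs : List Char) (i : Nat) (t : Int) :
    aLoop cs i t = t + fTok false (cs.drop i) := by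
  fun_induction aLoop cs i t with
  | case1 i t h c hget hlow ih =>
    have h1 : ((i : Int) + 1) = ((i + 1 : Nat) : Int) := by push_cast; ring
    rw [h1, PySem.List.pyGet?_natCast] at hget
    have hi1 : i + 1 < cs.length := by
      by_contra hc
      simp [List.getElem?_eq_none (by omega : cs.length ≤ i + 1)] at hget
    rw [List.drop_eq_getElem_cons h, List.drop_eq_getElem_cons hi1]
    have hc : cs[i+1] = c := by
      rw [List.getElem?_eq_getElem hi1] at hget; exact Option.some.inj hget
    rw [ih, hc]
    simp [fTok, hlow]
    try ring
  | case2 i t h c hget hlow ih =>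
    have h1 : ((i : Int) + 1) = ((i + 1 : Nat) : Int) := by push_cast; ring
    rw [h1, PySem.List.pyGet?_natCast] at hget
    have hi1 : i + 1 < cs.length := by
      by_contra hc
      simp [List.getElem?_eq_none (by omega : cs.length ≤ i + 1)] at hget
    rw [List.drop_eq_getElem_cons h]
    have hd : cs.drop (i+1) = cs[i+1] :: cs.drop (i+2) := List.drop_eq_getElem_cons hi1
    have hc : cs[i+1] = c := by
      rw [List.getElem?_eq_getElem hi1] at hget; exact Option.some.inj hget
    rw [ih, hd, hc]
    simp [fTok, hlow]
    try ring
  | case3 i t h hget ih =>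
    have h1 : ((i : Int) + 1) = ((i + 1 : Nat) : Int) := by push_cast; ring
    rw [h1, PySem.List.pyGet?_natCast] at hget
    have hi1 : cs.length ≤ i + 1 := by
      by_contra hc
      rw [List.getElem?_eq_getElem (by omega)] at hget
      simp at hget
    have hd : cs.drop (i+1) = [] := List.drop_eq_nil_of_le hi1
    rw [List.drop_eq_getElem_cons h, ih, hd]
    simp [fTok]
    try ring
  | case4 i t h =>
    rw [List.drop_eq_nil_of_le (by omega)]
    simp [fTok]

theorem foldl_altStep_eq (cs : List Char) (toks : List (List Char)) :
    (((cs.foldl altStep toks).length : Int)) = (toks.length : Int) + fTok (isOpen toks) cs := by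
  induction cs generalizing toks with
  | nil => simp [fTok]
  | cons c r ih =>
    rw [List.foldl_cons, ih]
    match toks with
    | [] =>
      simp [altStep, isOpen, fTok]
      try ring
    | h :: tl =>
      by_cases hl : (PySem.Chars.islower c && (h.length == 1)) = true
      · have hpair := Bool.and_eq_true_iff.mp hl
        have hstep : altStep (h :: tl) c = (h ++ [c]) :: tl := by
          simp only [altStep]; rw [if_pos hl]
        have h1 : h.length = 1 := by simpa using hpair.2
        rw [hstep]
        simp [isOpen, fTok, hpair.1, h1]
        try ring
      · have hstep : altStep (h :: tl) c = [c] :: h :: tl := by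
          simp only [altStep]; rw [if_neg hl]
        rw [hstep]
        cases hln1 : (h.length == 1) with
        | true =>
          have hlo : PySem.Chars.islower c = false := by
            cases hlow : PySem.Chars.islower c
            · rfl
            · exact absurd (by rw [hlow, hln1]; rfl) hl
          simp [isOpen, fTok, hlo, hln1]
          try ring
        | false =>
          simp [isOpen, fTok, hln1]
          try ring

-- ===== VERDICT (by name: the statement is the Claim_ definition above) =====
theorem askalski_solution_spec : Claim_equal_askalski_solution := by
  intro s _
  unfold Spec_askalski_solution askalski_solution askalski_solution_alt
  have hA := aLoop_eq s.toList 0 0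
  have hB := foldl_altStep_eq s.toList []
  simp [isOpen] at hA hB
  simp only [hA, hB]
  ring
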